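-- pv_equiv track=rewrite | github.com/wilzbach/zodiacy | utils.py | join_tokens_to_sentences
-- ===== SOURCE A (Python) =====
-- SENTENCE_STOPS = [".", "?", ",", ":", ";", "'"]
--
-- def join_tokens_to_sentences(tokens):
--     """ Correctly joins tokens to multiple sentences
--
--     Instead of always placing white-space between the tokens, it will distinguish
--     between the next symbol and *not* insert whitespace if it is a sentence
--     symbol (e.g. '.', or '?')
--
--     Args:
--         tokens: array of string tokens
--     Returns:
--         Joint sentences as one string
--     """
--     text = ""
--     for (entry, next_entry) in zip(tokens, tokens[1:]):
--         text += entry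
--         if next_entry not in SENTENCE_STOPS:
--             text += " "
--
--     text += tokens[-1]
--     return text
-- ===== SOURCE B (Python) =====
-- SENTENCE_STOPS = [".", "?", ",", ":", ";", "'"]
--
-- def join_tokens_to_sentences(tokens):
--     # Stage 1: glue each sentence-stop token onto the end of the chunk before it,
--     # producing a list of "word+punctuation" chunks.
--     chunks = [tokens[0]]
--     for t in tokens[1:]:
--         if t in SENTENCE_STOPS:
--             chunks[-1] += t
--         else:
--             chunks.append(t)
--     # Stage 2: standard space join of the chunks.
--     return " ".join(chunks)
-- ===== Notes on version B (the rewrite author's own statement) =====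
-- stated objective: idiomatic
-- what changed: Instead of A's pairwise look-ahead over zip(tokens, tokens[1:]) that decides each separator from the NEXT token and appends tokens[-1] at the end, B first groups the tokens into chunks by gluing every sentence-stop token onto the end of the previous chunk, and then emits the result with a single standard ' '.join of the chunks; no per-separator decision survives into the join stage.
import Mathlib
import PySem

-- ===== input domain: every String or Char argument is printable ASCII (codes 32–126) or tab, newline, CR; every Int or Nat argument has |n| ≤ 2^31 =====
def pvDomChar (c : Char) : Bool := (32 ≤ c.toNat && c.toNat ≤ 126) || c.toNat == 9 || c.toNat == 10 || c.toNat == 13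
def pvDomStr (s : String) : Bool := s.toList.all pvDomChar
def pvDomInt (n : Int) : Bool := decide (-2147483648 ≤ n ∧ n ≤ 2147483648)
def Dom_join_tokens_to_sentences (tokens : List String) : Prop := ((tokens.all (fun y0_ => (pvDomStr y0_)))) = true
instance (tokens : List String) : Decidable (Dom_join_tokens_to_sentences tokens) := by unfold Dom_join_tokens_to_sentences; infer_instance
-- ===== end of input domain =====

-- B replaces A's pairwise look-ahead join (zip with tokens[1:], separator decided by the NEXT
-- token, trailing tokens[-1]) by two stages: glue every sentence-stop token onto the previous
-- chunk, then a single standard " ".join of the chunks.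

def SENTENCE_STOPS : List String := [".", "?", ",", ":", ";", "'"]

-- ===== PORT A =====
def join_tokens_to_sentences (tokens : List String) : String :=
  let text :=
    (tokens.zip (PySem.List.slice tokens (some 1) none)).foldl
      (fun text p =>
        let text := text ++ p.1
        if p.2 ∈ SENTENCE_STOPS then text else text ++ " ") ""
  -- tokens[-1]: IndexError (none) only on [], which Pre_ excludes
  text ++ ((PySem.List.pyGet? tokens (-1)).getD "")

-- ===== PORT B =====
def join_tokens_to_sentences_alt (tokens : List String) : String :=
  match tokens with
  | [] => ""  -- B's tokens[0] raises here; excluded by Pre_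
  | t0 :: rest =>
    let chunks := rest.foldl
      (fun chunks t =>
        if t ∈ SENTENCE_STOPS then
          -- chunks[-1] += t : chunks is always nonempty, so dropLast/getLast! are exact
          chunks.dropLast ++ [chunks.getLast! ++ t]
        else chunks ++ [t]) [t0]
    PySem.Str.join " " chunks

-- ===== PRECONDITION & SPEC =====
-- Pre_ excludes only the empty list, on which both A (tokens[-1]) and B (tokens[0]) raise IndexError.
def Pre_join_tokens_to_sentences (tokens : List String) : Prop := tokens ≠ []
instance (tokens : List String) : Decidable (Pre_join_tokens_to_sentences tokens) := by
  unfold Pre_join_tokens_to_sentences; infer_instance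

def pvWitness_join_tokens_to_sentences : List String := ["hello", "world", "."]

def Spec_join_tokens_to_sentences (tokens : List String) (out : String) : Prop := out = join_tokens_to_sentences_alt tokens
instance (tokens : List String) (out : String) : Decidable (Spec_join_tokens_to_sentences tokens out) := by unfold Spec_join_tokens_to_sentences; infer_instance

-- ===== CLAIM (what is proved, stated in full; the proofs are below) =====
def Claim_equal_join_tokens_to_sentences : Prop := ∀ (tokens : List String), Dom_join_tokens_to_sentences tokens → Pre_join_tokens_to_sentences tokens → Spec_join_tokens_to_sentences tokens (join_tokens_to_sentences tokens)

-- ===== LEMMAS AND PROOFS =====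

-- the common reference form: T rest is everything A appends after the first token
def jtsTail (rest : List String) : String :=
  match rest with
  | [] => ""
  | y :: rs => (if y ∈ SENTENCE_STOPS then "" else " ") ++ y ++ jtsTail rs

-- A-side: the zip fold plus the trailing last element equals acc ++ x ++ T rest
theorem jts_A_aux (rest : List String) : ∀ (x acc : String),
    ((x :: rest).zip rest).foldl
      (fun text p =>
        let text := text ++ p.1
        if p.2 ∈ SENTENCE_STOPS then text else text ++ " ") acc
      ++ (((x :: rest).getLast?).getD "")
    = acc ++ x ++ jtsTail rest := by
  induction rest with
  | nil => intro x acc; simp [jtsTail]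
  | cons y rs ih =>
    intro x acc
    simp only [List.zip_cons_cons, List.foldl_cons, List.getLast?_cons_cons]
    have h := ih y (if y ∈ SENTENCE_STOPS then acc ++ x else acc ++ x ++ " ")
    by_cases hy : y ∈ SENTENCE_STOPS <;>
      simp only [hy, if_true, if_false, jtsTail] at h ⊢ <;>
      · rw [h]; simp [String.append_assoc]

-- B-side fold abbreviation (for the lemmas only)
def jtsFoldB (rest : List String) (chunks : List String) : List String :=
  rest.foldl
    (fun chunks t =>
      if t ∈ SENTENCE_STOPS then chunks.dropLast ++ [chunks.getLast! ++ t]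
      else chunks ++ [t]) chunks

theorem jtsFoldB_eq (rest chunks : List String) :
    rest.foldl
      (fun chunks t =>
        if t ∈ SENTENCE_STOPS then chunks.dropLast ++ [chunks.getLast! ++ t]
        else chunks ++ [t]) chunks = jtsFoldB rest chunks := rfl

theorem jtsFoldB_cons (t : String) (rs cs : List String) :
    jtsFoldB (t :: rs) cs
      = jtsFoldB rs (if t ∈ SENTENCE_STOPS then cs.dropLast ++ [cs.getLast! ++ t] else cs ++ [t]) := by
  unfold jtsFoldB
  rw [List.foldl_cons]

theorem jts_getLast!_concat (cs : List String) (a : String) : (cs ++ [a]).getLast! = a := by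
  simp [List.getLast!_eq_getLast?_getD]

-- a prefix of complete chunks passes through the fold untouched
theorem jtsFoldB_prefix (rest : List String) : ∀ (cs : List String) (a : String),
    jtsFoldB rest (cs ++ [a]) = cs ++ jtsFoldB rest [a] := by
  induction rest with
  | nil => intro cs a; simp [jtsFoldB]
  | cons t rs ih =>
    intro cs a
    rw [jtsFoldB_cons, jtsFoldB_cons]
    by_cases ht : t ∈ SENTENCE_STOPS
    · simp only [ht, if_true]
      rw [List.dropLast_concat, jts_getLast!_concat,
        show ([a] : List String).dropLast = [] from rfl,
        show ([a] : List String).getLast! = a from jts_getLast!_concat [] a, List.nil_append]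
      exact ih cs (a ++ t)
    · simp only [ht, if_false]
      rw [ih (cs ++ [a]) t, ih [a] t]
      simp

theorem jtsFoldB_ne_nil (rest : List String) : ∀ cs : List String, cs ≠ [] → jtsFoldB rest cs ≠ [] := by
  induction rest with
  | nil => intro cs h; simpa [jtsFoldB] using h
  | cons t rs ih =>
    intro cs h
    rw [jtsFoldB_cons]
    by_cases ht : t ∈ SENTENCE_STOPS <;> simp only [ht, if_true, if_false] <;>
      exact ih _ (by simp)

theorem jts_join_cons (sep a : String) (l : List String) (hl : l ≠ []) :
    PySem.Str.join sep (a :: l) = a ++ sep ++ PySem.Str.join sep l := by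
  match l, hl with
  | b :: bs, _ =>
    apply String.toList_injective
    simp [PySem.Str.toList_join, PySem.Chars.join_cons_cons]

theorem jts_join_singleton (sep a : String) : PySem.Str.join sep [a] = a := by
  apply String.toList_injective
  simp [PySem.Str.toList_join, PySem.Chars.join_singleton]

-- B-side main lemma: the join of the fold starting from one open chunk is last ++ T rest
theorem jts_B_aux (rest : List String) : ∀ (last : String),
    PySem.Str.join " " (jtsFoldB rest [last]) = last ++ jtsTail rest := by
  induction rest with
  | nil => intro last; simp [jtsFoldB, jts_join_singleton, jtsTail]
  | cons t rs ih =>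
    intro last
    rw [jtsFoldB_cons]
    by_cases ht : t ∈ SENTENCE_STOPS
    · simp only [ht, if_true, List.dropLast_singleton, List.getLast!_eq_getLast?_getD,
        List.getLast?_singleton, Option.getD_some, List.nil_append]
      rw [ih (last ++ t)]
      simp [jtsTail, ht, String.append_assoc]
    · simp only [ht, if_false, List.singleton_append]
      rw [show ([last, t] : List String) = [last] ++ [t] from rfl, jtsFoldB_prefix rs [last] t,
        List.singleton_append, jts_join_cons " " last _ (jtsFoldB_ne_nil rs [t] (by simp)), ih t]
      simp [jtsTail, ht, String.append_assoc]

-- ===== VERDICT (by name: the statement is the Claim_ definition above) =====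
theorem join_tokens_to_sentences_spec : Claim_equal_join_tokens_to_sentences := by
  intro tokens _ hpre
  match tokens with
  | [] => exact absurd rfl hpre
  | x :: rest =>
    show join_tokens_to_sentences (x :: rest) = join_tokens_to_sentences_alt (x :: rest)
    unfold join_tokens_to_sentences join_tokens_to_sentences_alt
    rw [PySem.List.pyGet?_neg_one]
    have hs : PySem.List.slice (x :: rest) (some 1) none = rest := by
      have := PySem.List.slice_from_natCast (x :: rest) 1
      simpa using this
    rw [hs]
    simp only [jtsFoldB_eq]
    rw [jts_B_aux rest x]
    have := jts_A_aux rest x ""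
    simpa using this
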